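-- pv_equiv track=rewrite | github.com/haominhe/Undergraduate | CIS122 Introduction to Programming and Problem Solving/Python Group Meeting 2.py | db_consistent
-- ===== SOURCE A (Python) =====
-- def db_consistent(dict_of_dict):
--     '''(dict of dict) -> set
--
--     Return whether all inner dictionaries in dict_of_dict contain the same keys.
--
--     >>> db_consistent({'A': {1: 'a', 2: 'b'}, 'B': {2: 'c', 3: 'd'}})
--     False
--     >>> db_consistent({'A': {1: 'a', 2: 'b'}, 'B': {2: 'c', 1: 'd'}})
--     True
--
--     '''
--     inner_keys_list = [] #list
--
--     for key in dict_of_dict: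
--         inner_keys = list(dict_of_dict[key].keys())
--         inner_keys.sort()
--         inner_keys_list.append(inner_keys)
--
--
--     for i in range(1, len(inner_keys_list)):
--         if len(inner_keys_list[0]) != len(inner_keys_list[i]):
--               return False
--
--         for j in range(len(inner_keys_list[0])):
--                if inner_keys_list[0][j] != inner_keys_list[i][j]:
--                    return False
--
--     return True
-- ===== SOURCE B (Python) =====
-- def db_consistent(dict_of_dict):
--     vals = iter(dict_of_dict.values())
--     first = next(vals, None)
--     if first is None:
--         return True
--     ref = set(first.keys())
--     return all(len(inner) == len(ref) and all(k in ref for k in inner)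
--                for inner in vals)
-- ===== Notes on version B (the rewrite author's own statement) =====
-- stated objective: alternative
-- what changed: Drops A's sort-every-key-list-then-compare-elementwise strategy: B puts the first inner dict's keys in a hash set once and checks every other inner dict by a length test plus set membership of each key, with no sorting at all.
import Mathlib
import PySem

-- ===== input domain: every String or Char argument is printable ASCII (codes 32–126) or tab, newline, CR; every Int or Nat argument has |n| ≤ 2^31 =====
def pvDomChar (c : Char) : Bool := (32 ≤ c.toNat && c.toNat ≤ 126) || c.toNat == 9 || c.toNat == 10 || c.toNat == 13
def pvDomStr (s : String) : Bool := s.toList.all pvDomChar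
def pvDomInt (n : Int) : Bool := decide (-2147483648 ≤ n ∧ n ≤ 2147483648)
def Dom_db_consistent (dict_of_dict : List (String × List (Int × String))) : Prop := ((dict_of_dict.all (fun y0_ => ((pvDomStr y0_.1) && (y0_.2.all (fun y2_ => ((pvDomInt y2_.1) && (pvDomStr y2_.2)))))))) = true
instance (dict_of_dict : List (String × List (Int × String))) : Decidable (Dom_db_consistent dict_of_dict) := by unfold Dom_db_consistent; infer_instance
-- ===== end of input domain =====

-- B replaces A's sort-each-key-list-and-compare-to-the-first strategy by a sort-free single pass:
-- the first inner dict's keys go into a set once, every other inner dict is checked by a length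
-- test plus per-key set membership (alternative decomposition, no sorting).

-- ===== PORT A =====
-- the inner 'for j in range(len(inner_keys_list[0]))' loop: element-by-element comparison, first mismatch returns False
def pvScanEq : List Int → List Int → Bool
  | [], _ => true
  | _ :: _, [] => true
  | x :: xs, y :: ys => if x ≠ y then false else pvScanEq xs ys

-- the outer 'for i in range(1, len(inner_keys_list))' loop
def pvOuterLoop (first : List Int) : List (List Int) → Bool
  | [] => true
  | l :: rest =>
      if first.length ≠ l.length then false
      else if pvScanEq first l = false then false
      else pvOuterLoop first rest

def db_consistent (dict_of_dict : List (String × List (Int × String))) : Bool :=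
  let d := PySem.Dict.ofList dict_of_dict
  -- first pass: inner_keys_list.append(sorted(dict_of_dict[key].keys()))
  let inner_keys_list := d.items.map (fun kv => PySem.List.sorted (PySem.Dict.ofList kv.2).keys (fun x => x) false)
  match inner_keys_list with
  | [] => true
  | first :: rest => pvOuterLoop first rest

-- ===== PORT B =====
def db_consistent_alt (dict_of_dict : List (String × List (Int × String))) : Bool :=
  match (PySem.Dict.ofList dict_of_dict).values with
  | [] => true                                  -- next(vals, None) is None
  | first :: rest =>
      let ref : PySem.Set Int := PySem.Set.ofList (PySem.Dict.ofList first).keys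
      rest.all (fun inner =>
        let d := PySem.Dict.ofList inner
        (d.size == ref.length) && d.keys.all (fun k => ref.contains k))

-- ===== PRECONDITION & SPEC =====
def Spec_db_consistent (dict_of_dict : List (String × List (Int × String))) (out : Bool) : Prop := out = db_consistent_alt dict_of_dict
instance (dict_of_dict : List (String × List (Int × String))) (out : Bool) : Decidable (Spec_db_consistent dict_of_dict out) := by unfold Spec_db_consistent; infer_instance

-- ===== CLAIM (what is proved, stated in full; the proofs are below) =====
def Claim_equal_db_consistent : Prop := ∀ (dict_of_dict : List (String × List (Int × String))), Dom_db_consistent dict_of_dict → Spec_db_consistent dict_of_dict (db_consistent dict_of_dict)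

-- ===== LEMMAS AND PROOFS =====

lemma pvScanEq_spec (a : List Int) : ∀ b : List Int, a.length = b.length →
    (pvScanEq a b = true ↔ a = b) := by
  induction a with
  | nil => intro b h; cases b <;> simp [pvScanEq] at h ⊢
  | cons x xs ih =>
      intro b h
      cases b with
      | nil => simp at h
      | cons y ys =>
          simp only [List.length_cons, Nat.succ.injEq] at h
          simp only [pvScanEq]
          by_cases hxy : x = y
          · simp [hxy, ih ys h]
          · simp [hxy]

lemma pvOuterLoop_spec (first : List Int) (rest : List (List Int)) :
    (pvOuterLoop first rest = true ↔ ∀ l ∈ rest, l = first) := by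
  induction rest with
  | nil => simp [pvOuterLoop]
  | cons l rest ih =>
      simp only [pvOuterLoop]
      by_cases hlen : first.length = l.length
      · have hscan := pvScanEq_spec first l hlen
        by_cases hs : pvScanEq first l = true
        · have hfl : first = l := hscan.mp hs
          subst hfl
          simp [hs, ih]
        · have hne : first ≠ l := fun h => hs (hscan.mpr h)
          have hs' : pvScanEq first l = false := by
            revert hs; cases pvScanEq first l <;> simp
          rw [if_neg (fun h => h hlen), if_pos hs']
          simp only [Bool.false_eq_true, false_iff]
          intro h
          exact hne (h l (by simp)).symm
      · rw [if_pos hlen]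
        simp only [Bool.false_eq_true, false_iff]
        intro h
        have := h l (by simp)
        exact hlen (by rw [this])

-- for Nodup lists, permutation = equal length plus inclusion
lemma perm_iff_length_subset {l₁ l₂ : List Int} (h₁ : l₁.Nodup) :
    l₁.Perm l₂ ↔ (l₁.length = l₂.length ∧ l₁ ⊆ l₂) := by
  constructor
  · intro h; exact ⟨h.length_eq, h.subset⟩
  · rintro ⟨hlen, hsub⟩
    exact (h₁.subperm hsub).perm_of_length_le (le_of_eq hlen.symm)

-- per-inner-dict check: A's sorted-list equality = B's length-and-membership test
lemma per_inner (first inner : List (Int × String)) :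
    (PySem.List.sorted (PySem.Dict.ofList inner).keys (fun x => x) false
        = PySem.List.sorted (PySem.Dict.ofList first).keys (fun x => x) false)
    ↔ (((PySem.Dict.ofList inner).size == (PySem.Set.ofList (PySem.Dict.ofList first).keys).length)
        && (PySem.Dict.ofList inner).keys.all
              (fun k => (PySem.Set.ofList (PySem.Dict.ofList first).keys).contains k)) = true := by
  have hndF : (PySem.Dict.ofList first).keys.Nodup := PySem.Dict.nodup_keys_ofList first
  have hndI : (PySem.Dict.ofList inner).keys.Nodup := PySem.Dict.nodup_keys_ofList inner
  have href : PySem.Set.ofList (PySem.Dict.ofList first).keys = (PySem.Dict.ofList first).keys :=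
    PySem.Set.ofList_eq_self_of_nodup _ hndF
  rw [href, PySem.List.sorted_id_eq_sorted_id_iff_perm,
      perm_iff_length_subset hndI]
  have hsize : (PySem.Dict.ofList inner).size = (PySem.Dict.ofList inner).keys.length := by
    simp [PySem.Dict.size, PySem.Dict.keys]
  simp only [Bool.and_eq_true, beq_iff_eq, List.all_eq_true, PySem.Set.contains_iff, hsize]
  constructor
  · rintro ⟨hl, hs⟩; exact ⟨hl, fun k hk => hs hk⟩
  · rintro ⟨hl, hs⟩; exact ⟨hl, fun k hk => hs k hk⟩

-- ===== VERDICT (by name: the statement is the Claim_ definition above) =====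
theorem db_consistent_spec : Claim_equal_db_consistent := by
  intro dod _
  show db_consistent dod = db_consistent_alt dod
  unfold db_consistent db_consistent_alt
  have hvals : (PySem.Dict.ofList dod).values
      = (PySem.Dict.ofList dod).items.map (fun kv => kv.2) := by
    simp [PySem.Dict.values]
  rw [hvals]
  cases hitems : (PySem.Dict.ofList dod).items with
  | nil => simp [hitems]
  | cons hd tl =>
      simp only [hitems, List.map_cons]
      rw [Bool.eq_iff_iff, pvOuterLoop_spec, List.all_eq_true]
      constructor
      · intro h inner hinner
        rcases List.mem_map.mp hinner with ⟨kv, hkv, rfl⟩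
        exact (per_inner hd.2 kv.2).mp
          (h _ (List.mem_map.mpr ⟨kv, hkv, rfl⟩))
      · intro h l hl
        rcases List.mem_map.mp hl with ⟨kv, hkv, rfl⟩
        exact (per_inner hd.2 kv.2).mpr
          (h _ (List.mem_map.mpr ⟨kv, hkv, rfl⟩))
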